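-- pv_equiv track=rewrite | github.com/eastmadc/wairz | backend/app/services/component_map_service.py | _is_init_script
-- ===== SOURCE A (Python) =====
-- SYSTEMD_DIRS = {"/etc/systemd/system", "/lib/systemd/system", "/usr/lib/systemd/system"}
--
-- def _is_init_script(rel_path: str) -> bool:
--     """Check if path is an init script location."""
--     parts = rel_path.split("/")
--     # /etc/init.d/*, /etc/rc*.d/*
--     if len(parts) >= 3 and parts[1] == "etc":
--         if parts[2] == "init.d":
--             return True
--         if parts[2].startswith("rc") and parts[2].endswith(".d"):
--             return True
--     # /etc/inittab
--     if rel_path == "/etc/inittab":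
--         return True
--     # systemd unit files
--     for sd_dir in SYSTEMD_DIRS:
--         if rel_path.startswith(sd_dir + "/"):
--             return True
--     return False
-- ===== SOURCE B (Python) =====
-- SYSTEMD_PREFIXES = ("/etc/systemd/system/", "/lib/systemd/system/", "/usr/lib/systemd/system/")
--
--
-- def _is_init_script(rel_path: str) -> bool:
--     """Check if path is an init script location."""
--     if rel_path == "/etc/inittab":
--         return True
--     if rel_path.startswith(SYSTEMD_PREFIXES):
--         return True
--     # second path component must be exactly "etc", followed by a third component
--     i = rel_path.find("/")
--     if i < 0 or not rel_path[i + 1:].startswith("etc/"):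
--         return False
--     seg = rel_path[i + 5:]
--     j = seg.find("/")
--     if j >= 0:
--         seg = seg[:j]
--     return seg == "init.d" or (seg.startswith("rc") and seg.endswith(".d"))
-- ===== Notes on version B (the rewrite author's own statement) =====
-- stated objective: simpler
-- what changed: B replaces A's full split of the path into a component list plus a loop over the systemd-directory set with direct prefix tests: an equality/startswith chain for inittab and the three systemd prefixes, then locating only the first slash and inspecting the single third component via find/slicing.
import Mathlib
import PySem

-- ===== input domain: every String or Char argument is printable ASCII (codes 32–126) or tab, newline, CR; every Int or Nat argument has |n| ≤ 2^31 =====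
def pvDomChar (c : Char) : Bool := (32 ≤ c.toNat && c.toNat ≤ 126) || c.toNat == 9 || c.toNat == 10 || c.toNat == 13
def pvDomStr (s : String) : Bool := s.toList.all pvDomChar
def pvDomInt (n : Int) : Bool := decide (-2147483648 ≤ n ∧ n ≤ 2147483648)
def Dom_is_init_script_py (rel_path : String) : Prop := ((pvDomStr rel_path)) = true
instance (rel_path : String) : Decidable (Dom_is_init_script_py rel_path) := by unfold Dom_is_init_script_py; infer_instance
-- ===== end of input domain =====

-- B replaces A's full component split + loop over the systemd set by direct prefix tests and a
-- find/slice of the single third component; same values on every input (objective: simpler).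

-- ===== PORT A =====
def pySYSTEMD_DIRS : PySem.Set String :=
  PySem.Set.ofList ["/etc/systemd/system", "/lib/systemd/system", "/usr/lib/systemd/system"]

-- 'for sd_dir in SYSTEMD_DIRS: if rel_path.startswith(sd_dir + "/"): return True' — the result
-- (an any) is independent of the set's iteration order, so iterating the Set's element list is exact.
def sysdLoop (rel_path : String) : List String → Bool
  | [] => false
  | d :: rest => if PySem.Str.startswith rel_path (d ++ "/") then true else sysdLoop rel_path rest

def is_init_script_py (rel_path : String) : Bool :=
  match PySem.Str.split? rel_path "/" with
  | none => false  -- unreachable: the separator "/" is nonempty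
  | some parts =>
    let etcHit : Bool :=
      if 3 ≤ parts.length && (PySem.List.pyGet? parts 1 == some "etc") then
        if PySem.List.pyGet? parts 2 == some "init.d" then true
        else
          match PySem.List.pyGet? parts 2 with
          | some p2 => PySem.Str.startswith p2 "rc" && PySem.Str.endswith p2 ".d"
          | none => false
      else false
    if etcHit then true
    else if rel_path == "/etc/inittab" then true
    else sysdLoop rel_path pySYSTEMD_DIRS

-- ===== PORT B =====
def pySYSTEMD_PREFIXES : List String :=
  ["/etc/systemd/system/", "/lib/systemd/system/", "/usr/lib/systemd/system/"]

def is_init_script_py_alt (rel_path : String) : Bool :=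
  if rel_path == "/etc/inittab" then true
  else if pySYSTEMD_PREFIXES.any (fun p => PySem.Str.startswith rel_path p) then true
  else
    let i := PySem.Str.find rel_path "/"
    if i < 0 then false
    else if !(PySem.Str.startswith (PySem.Str.slice rel_path (some (i+1)) none) "etc/") then false
    else
      let seg0 := PySem.Str.slice rel_path (some (i+5)) none
      let j := PySem.Str.find seg0 "/"
      let seg := if 0 ≤ j then PySem.Str.slice seg0 none (some j) else seg0
      (seg == "init.d") || (PySem.Str.startswith seg "rc" && PySem.Str.endswith seg ".d")

-- ===== PRECONDITION & SPEC =====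
def Spec_is_init_script_py (rel_path : String) (out : Bool) : Prop := out = is_init_script_py_alt rel_path
instance (rel_path : String) (out : Bool) : Decidable (Spec_is_init_script_py rel_path out) := by unfold Spec_is_init_script_py; infer_instance

-- ===== CLAIM (what is proved, stated in full; the proofs are below) =====
def Claim_equal_is_init_script_py : Prop := ∀ (rel_path : String), Dom_is_init_script_py rel_path → Spec_is_init_script_py rel_path (is_init_script_py rel_path)

-- ===== LEMMAS AND PROOFS =====

def mySplitAux : List Char → List Char → List (List Char)
  | [], cur => [cur.reverse]
  | c :: r, cur => if c = '/' then cur.reverse :: mySplitAux r [] else mySplitAux r (c :: cur)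

theorem go_nil (fuel : Nat) (cur : List Char) (acc : List (List Char)) :
    PySem.Chars.splitOn.go ['/'] fuel [] cur acc = (cur.reverse :: acc).reverse := by
  cases fuel <;> (rw [PySem.Chars.splitOn.go]; simp)
theorem go_slash (fuel : Nat) (rest cur : List Char) (acc : List (List Char)) :
    PySem.Chars.splitOn.go ['/'] (fuel+1) ('/' :: rest) cur acc
      = PySem.Chars.splitOn.go ['/'] fuel rest [] (cur.reverse :: acc) := by
  rw [PySem.Chars.splitOn.go]; simp [List.isPrefixOf]
theorem go_ne (fuel : Nat) (c : Char) (rest cur : List Char) (acc : List (List Char)) (hc : ¬ c = '/') :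
    PySem.Chars.splitOn.go ['/'] (fuel+1) (c :: rest) cur acc
      = PySem.Chars.splitOn.go ['/'] fuel rest (c :: cur) acc := by
  rw [PySem.Chars.splitOn.go]
  have : ('/' == c) = false := by simp [Ne.symm hc]
  simp [List.isPrefixOf, this]

theorem go_spec (l : List Char) : ∀ (fuel : Nat) (cur : List Char) (acc : List (List Char)),
    l.length ≤ fuel →
    PySem.Chars.splitOn.go ['/'] fuel l cur acc = acc.reverse ++ mySplitAux l cur := by
  induction l with
  | nil => intro fuel cur acc _; simp [go_nil, mySplitAux]
  | cons c r ih =>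
    intro fuel cur acc h
    cases fuel with
    | zero => simp at h
    | succ f =>
      by_cases hc : c = '/'
      · subst hc
        rw [go_slash, ih f [] (cur.reverse :: acc) (by simpa using h)]
        simp [mySplitAux]
      · rw [go_ne _ _ _ _ _ hc, ih f (c :: cur) acc (by simpa using h)]
        simp [mySplitAux, hc]

theorem splitOn_eq (cs : List Char) :
    PySem.Chars.splitOn cs ['/'] = mySplitAux cs [] := by
  rw [PySem.Chars.splitOn, go_spec cs (cs.length + 1) [] [] (by omega)]; simp

theorem mySplitAux_ne_nil (l : List Char) : ∀ cur, mySplitAux l cur ≠ [] := by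
  induction l with
  | nil => intro cur; simp [mySplitAux]
  | cons c r ih => intro cur; by_cases hc : c = '/' <;> simp [mySplitAux, hc, ih]

theorem mySplitAux_noslash {l : List Char} (h : '/' ∉ l) : ∀ (cur : List Char),
    mySplitAux l cur = [cur.reverse ++ l] := by
  induction l with
  | nil => intro cur; simp [mySplitAux]
  | cons c r ih =>
    intro cur
    simp only [List.mem_cons, not_or] at h
    rw [mySplitAux]
    rw [if_neg (fun hc => h.1 hc.symm), ih h.2]
    simp
theorem mySplitAux_split {p : List Char} (h : '/' ∉ p) (r : List Char) : ∀ (cur : List Char),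
    mySplitAux (p ++ '/' :: r) cur = (cur.reverse ++ p) :: mySplitAux r [] := by
  induction p with
  | nil => intro cur; simp [mySplitAux]
  | cons c q ih =>
    intro cur
    simp only [List.mem_cons, not_or] at h
    rw [List.cons_append, mySplitAux]
    rw [if_neg (fun hc => h.1 hc.symm), ih h.2]
    simp

theorem slash_decomp (cs : List Char) :
    '/' ∉ cs ∨ ∃ p r, cs = p ++ '/' :: r ∧ '/' ∉ p := by
  induction cs with
  | nil => left; simp
  | cons c t ih =>
    by_cases hc : c = '/'
    · subst hc; exact Or.inr ⟨[], t, by simp⟩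
    · rcases ih with h | ⟨p, r, rfl, hp⟩
      · left; simp [h, Ne.symm hc]
      · exact Or.inr ⟨c :: p, r, by simp [hp, Ne.symm hc]⟩

theorem singleton_prefix_iff (a : Char) (l : List Char) : [a] <+: l ↔ l[0]? = some a := by
  cases l with
  | nil => simp
  | cons b t => simp [List.cons_prefix_cons, eq_comm]

theorem find_slash_of_noslash {l : List Char} (h : '/' ∉ l) :
    PySem.Chars.find l ['/'] = -1 := by
  rw [PySem.Chars.find_eq_neg_one_iff]
  intro hinf
  exact h (hinf.mem (by simp))

theorem find_slash_of_decomp {p r : List Char} (hp : '/' ∉ p) :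
    PySem.Chars.find (p ++ '/' :: r) ['/'] = (p.length : Int) := by
  set cs := p ++ '/' :: r with hcs
  have hinf : ['/'] <:+: cs := ⟨p, r, by simp [hcs]⟩
  have h0 : 0 ≤ PySem.Chars.find cs ['/'] := (PySem.Chars.find_nonneg_iff cs ['/']).mpr hinf
  obtain ⟨hpre, hmin⟩ := PySem.Chars.find_spec h0
  set n := (PySem.Chars.find cs ['/']).toNat with hn
  have hdropP : cs.drop p.length = '/' :: r := by
    rw [hcs]; simpa using List.drop_left p ('/' :: r)
  have hle : ¬ p.length < n := by
    intro hgt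
    exact hmin p.length hgt (by rw [hdropP]; exact ⟨r, rfl⟩)
  have hnlt : ¬ n < p.length := by
    intro hlt
    have hpre0 := (singleton_prefix_iff _ _).mp hpre
    rw [List.getElem?_drop, Nat.add_zero] at hpre0
    rw [hcs, List.getElem?_append_left hlt] at hpre0
    exact hp (List.mem_of_getElem? hpre0)
  have hne : n = p.length := by omega
  omega

theorem etc_prefix_iff {q r2 : List Char} (hq : '/' ∉ q) :
    ("etc/".toList <+: q ++ '/' :: r2) ↔ q = "etc".toList := by
  constructor
  · intro h
    match q, hq with
    | [], hq => simp [List.cons_prefix_cons] at h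
    | [a], hq => simp [List.cons_prefix_cons] at h
    | [a,b], hq => simp [List.cons_prefix_cons] at h
    | [a,b,c], hq =>
      simp [List.cons_prefix_cons] at h
      simp [← h.1, ← h.2.1, ← h.2.2]
    | a::b::c::d::q', hq =>
      simp [List.cons_prefix_cons] at h
      exact absurd (by simp [← h.2.2.2] : '/' ∈ a::b::c::d::q') hq
  · rintro rfl
    exact ⟨r2, rfl⟩

theorem dirs_eval : pySYSTEMD_DIRS = ["/etc/systemd/system", "/lib/systemd/system", "/usr/lib/systemd/system"] := by decide

theorem sysd_eq (s : String) :
    sysdLoop s pySYSTEMD_DIRS = pySYSTEMD_PREFIXES.any (fun p => PySem.Str.startswith s p) := by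
  rw [dirs_eval]
  simp only [sysdLoop, pySYSTEMD_PREFIXES, List.any_cons, List.any_nil]
  rw [(by rfl : "/etc/systemd/system" ++ "/" = "/etc/systemd/system/")]
  rw [(by rfl : "/lib/systemd/system" ++ "/" = "/lib/systemd/system/")]
  rw [(by rfl : "/usr/lib/systemd/system" ++ "/" = "/usr/lib/systemd/system/")]
  cases PySem.Str.startswith s "/etc/systemd/system/" <;>
    cases PySem.Str.startswith s "/lib/systemd/system/" <;>
      cases PySem.Str.startswith s "/usr/lib/systemd/system/" <;> simp


theorem split_eq (s : String) :
    PySem.Str.split? s "/" = some ((mySplitAux s.toList []).map String.ofList) := by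
  have h := PySem.Str.split?_map s "/"
  have hc : PySem.Chars.split? s.toList "/".toList = some (mySplitAux s.toList []) := by
    rw [PySem.Chars.split?]
    simp [splitOn_eq]
  rw [hc] at h
  cases hx : PySem.Str.split? s "/" with
  | none => rw [hx] at h; simp at h
  | some parts =>
    rw [hx] at h
    simp only [Option.map_some, Option.some.injEq] at h
    have : parts = (mySplitAux s.toList []).map String.ofList := by
      rw [← h, List.map_map]
      simp [Function.comp_def]
    rw [this]

theorem any_decide (s : String) :
    (decide (∃ x ∈ pySYSTEMD_PREFIXES, PySem.Chars.startswith s.toList x.toList = true))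
      = (pySYSTEMD_PREFIXES.any fun p => PySem.Chars.startswith s.toList p.toList) := by
  simp [pySYSTEMD_PREFIXES]

theorem str_beq_decide (a b : String) : (a == b) = decide (a = b) := rfl

theorem eq_ofList_of_toList {x : String} {l : List Char} (h : x.toList = l) :
    x = String.ofList l := by
  rw [← h]; simp

theorem slice_from_eq (s : String) (a : Int) (h0 : 0 ≤ a) {l : List Char}
    (h : s.toList.drop a.toNat = l) :
    PySem.Str.slice s (some a) none = String.ofList l := by
  apply eq_ofList_of_toList
  rw [PySem.Str.toList_slice]
  simp only [PySem.Chars.slice_eq_listSlice]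
  rw [PySem.List.slice_from _ h0]
  exact h

theorem slice_to_eq (s : String) (b : Int) (h0 : 0 ≤ b) {l : List Char}
    (h : s.toList.take b.toNat = l) :
    PySem.Str.slice s none (some b) = String.ofList l := by
  apply eq_ofList_of_toList
  rw [PySem.Str.toList_slice]
  simp only [PySem.Chars.slice_eq_listSlice]
  rw [PySem.List.slice_to _ h0]
  exact h

theorem pyGet?_one (xs : List String) : PySem.List.pyGet? xs 1 = xs[1]? := by
  rw [show (1:Int) = ((1:Nat):Int) by norm_num, PySem.List.pyGet?_natCast]

theorem pyGet?_two (xs : List String) : PySem.List.pyGet? xs 2 = xs[2]? := by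
  rw [show (2:Int) = ((2:Nat):Int) by norm_num, PySem.List.pyGet?_natCast]

-- ===== VERDICT (by name: the statement is the Claim_ definition above) =====
theorem is_init_script_py_spec : Claim_equal_is_init_script_py := by
  intro s _
  show is_init_script_py s = is_init_script_py_alt s
  rw [is_init_script_py, is_init_script_py_alt, split_eq s, sysd_eq s]
  rcases slash_decomp s.toList with h | ⟨p, r, hcs, hp⟩
  · -- no slash in the path
    have hfind : PySem.Str.find s "/" = -1 := by
      rw [PySem.Str.find_eq]
      exact find_slash_of_noslash h
    have hL : mySplitAux s.toList [] = [s.toList] := mySplitAux_noslash h []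
    rw [hL, hfind]
    simp only [List.map_cons, List.map_nil, List.length_cons, List.length_nil]
    norm_num
    rw [any_decide]
  · -- first slash after p
    have hfind : PySem.Str.find s "/" = (p.length : Int) := by
      rw [PySem.Str.find_eq, (by rfl : "/".toList = ['/']), hcs]
      exact find_slash_of_decomp hp
    have hs1 : PySem.Str.slice s (some ((p.length:Int) + 1)) none = String.ofList r := by
      apply slice_from_eq _ _ (by omega)
      rw [hcs, (by omega : ((p.length:Int)+1).toNat = p.length + 1)]
      rw [← List.drop_drop, List.drop_left]
      rfl
    have hswr : PySem.Str.startswith (String.ofList r) "etc/"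
        = PySem.Chars.startswith r "etc/".toList := by
      rw [PySem.Str.startswith_eq]; simp
    simp only [hfind, hs1, hswr]
    rcases slash_decomp r with hr | ⟨q, r2, hrq, hq⟩
    · -- no second slash: second component never closed by '/'
      have hL : mySplitAux s.toList [] = [p, r] := by
        rw [hcs, mySplitAux_split hp, mySplitAux_noslash hr]
        simp
      have hsw : PySem.Chars.startswith r "etc/".toList = false := by
        apply Bool.eq_false_iff.mpr
        intro htrue
        exact hr (((PySem.Chars.startswith_iff _ _).mp htrue).subset (by decide))
      rw [hL, hsw]
      simp only [List.map_cons, List.map_nil, List.length_cons, List.length_nil]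
      norm_num
      rw [any_decide]
    · -- second component q
      have hL : mySplitAux s.toList [] = p :: q :: mySplitAux r2 [] := by
        rw [hcs, hrq, mySplitAux_split hp, mySplitAux_split hq]
        simp
      have hlen : 3 ≤ (p :: q :: mySplitAux r2 []).length := by
        have := mySplitAux_ne_nil r2 []
        have := List.length_pos_iff.mpr this
        simp only [List.length_cons]
        omega
      by_cases hq3 : q = "etc".toList
      · subst hq3
        have hsw : PySem.Chars.startswith r "etc/".toList = true := by
          rw [PySem.Chars.startswith_iff, hrq]
          exact (etc_prefix_iff hq).mpr rfl
        have hs5 : PySem.Str.slice s (some ((p.length:Int) + 5)) none = String.ofList r2 := by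
          apply slice_from_eq _ _ (by omega)
          rw [hcs, hrq, (by omega : ((p.length:Int)+5).toNat = p.length + 5)]
          rw [← List.drop_drop, List.drop_left]
          rfl
        rw [hL, hsw, hs5]
        rcases slash_decomp r2 with h2 | ⟨u, v, hu, hnu⟩
        · -- third component runs to the end
          have hM : mySplitAux r2 [] = [r2] := mySplitAux_noslash h2 []
          have hj : PySem.Str.find (String.ofList r2) "/" = -1 := by
            rw [PySem.Str.find_eq, (by rfl : "/".toList = ['/'])]
            simp only [String.toList_ofList]
            exact find_slash_of_noslash h2
          rw [hM, hj]
          simp only [List.map_cons, List.map_nil, pyGet?_one, pyGet?_two,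
            List.getElem?_cons_succ, List.getElem?_cons_zero, List.length_cons, List.length_nil,
            PySem.Str.startswith_eq, PySem.Str.endswith_eq, String.toList_ofList]
          norm_num
          rw [any_decide]
          have hnn : (decide ((p.length : Int) < 0)) = false := by simp
          simp [str_beq_decide, hnn, Bool.or_comm, Bool.or_left_comm, Bool.or_assoc]
        · -- third component u before the next slash
          have hM : mySplitAux r2 [] = u :: mySplitAux v [] := by
            rw [hu, mySplitAux_split hnu]
            simp
          have hj : PySem.Str.find (String.ofList r2) "/" = (u.length : Int) := by
            rw [PySem.Str.find_eq, (by rfl : "/".toList = ['/'])]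
            simp only [String.toList_ofList]
            rw [hu]
            exact find_slash_of_decomp hnu
          have hseg : PySem.Str.slice (String.ofList r2) none (some ((u.length:Int)))
              = String.ofList u := by
            apply slice_to_eq _ _ (by omega)
            simp only [String.toList_ofList]
            rw [hu, (by omega : ((u.length:Int)).toNat = u.length), List.take_left]
          rw [hM, hj, hseg]
          simp only [List.map_cons, pyGet?_one, pyGet?_two,
            List.getElem?_cons_succ, List.getElem?_cons_zero, List.length_cons,
            PySem.Str.startswith_eq, PySem.Str.endswith_eq, String.toList_ofList]
          norm_num
          rw [any_decide]
          have hnn : (decide ((p.length : Int) < 0)) = false := by simp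
          simp [str_beq_decide, hnn, Bool.or_comm, Bool.or_left_comm, Bool.or_assoc]
      · -- second component is not "etc"
        have hsw : PySem.Chars.startswith r "etc/".toList = false := by
          apply Bool.eq_false_iff.mpr
          intro htrue
          rw [PySem.Chars.startswith_iff, hrq] at htrue
          exact hq3 ((etc_prefix_iff hq).mp htrue)
        rw [hL, hsw]
        simp only [List.map_cons, pyGet?_one, List.getElem?_cons_succ,
          List.getElem?_cons_zero]
        have hq4 : ¬ (String.ofList q = "etc") := by
          intro hh
          apply hq3
          have := congrArg String.toList hh
          simpa using this
        norm_num
        simp [hq4, any_decide]
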